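-- pv_equiv track=rewrite | github.com/SKirilov7/SoftUni-Courses | practice.py | last_nums_odd_or_even
-- ===== SOURCE A (Python) =====
-- def last_nums_odd_or_even(list_of_int, count, odd_or_even):
--     list_of_odd_or_even_nums = []
--     if count > len(list_of_int):
--         return 'Invalid count'
--     if odd_or_even == 'odd':
--         for el in list_of_int:
--             if not el % 2 == 0:
--                 list_of_odd_or_even_nums.append(el)
--     elif odd_or_even == 'even':
--         for el in list_of_int:
--             if el % 2 == 0:
--                 list_of_odd_or_even_nums.append(el)
--     numbers_needed = []
--     if count > len(list_of_odd_or_even_nums):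
--         numbers_needed = list_of_odd_or_even_nums
--     else:
--         index = len(list_of_odd_or_even_nums) - count
--         numbers_needed = list_of_odd_or_even_nums[index:]
--     return numbers_needed
-- ===== SOURCE B (Python) =====
-- def last_nums_odd_or_even(list_of_int, count, odd_or_even):
--     if count > len(list_of_int):
--         return 'Invalid count'
--     if odd_or_even == 'odd':
--         pred = lambda el: el % 2 != 0
--     elif odd_or_even == 'even':
--         pred = lambda el: el % 2 == 0
--     else:
--         return []
--     picked = []
--     for el in reversed(list_of_int):
--         if len(picked) >= count:
--             break
--         if pred(el):
--             picked.append(el)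
--     picked.reverse()
--     return picked
-- ===== Notes on version B (the rewrite author's own statement) =====
-- stated objective: alternative
-- what changed: B selects the last `count` parity-matching elements directly by an early-stopping backward scan (stopping after `count` matches, then reversing back), instead of filtering the whole list and slicing off its tail.
-- outside the precondition, e.g. on last_nums_odd_or_even([1, 2], 3, 'odd'): A returns 'Invalid count', B returns 'Invalid count'
import Mathlib
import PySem

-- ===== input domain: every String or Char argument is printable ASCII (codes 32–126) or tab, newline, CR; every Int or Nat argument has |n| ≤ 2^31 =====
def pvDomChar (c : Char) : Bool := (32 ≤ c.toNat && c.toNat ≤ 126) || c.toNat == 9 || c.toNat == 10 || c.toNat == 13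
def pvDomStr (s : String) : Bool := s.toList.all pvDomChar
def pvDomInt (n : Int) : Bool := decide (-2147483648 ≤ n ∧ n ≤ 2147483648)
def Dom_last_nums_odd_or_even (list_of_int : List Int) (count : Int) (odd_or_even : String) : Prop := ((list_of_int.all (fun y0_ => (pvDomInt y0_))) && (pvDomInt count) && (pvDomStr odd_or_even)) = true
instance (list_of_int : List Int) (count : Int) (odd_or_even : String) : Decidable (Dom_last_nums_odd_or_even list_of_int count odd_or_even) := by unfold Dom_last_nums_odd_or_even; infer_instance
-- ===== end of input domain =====

-- B replaces A's filter-everything-then-slice by an early-stopping backward scan (alternative decomposition, same cost class).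

-- ===== PORT A =====
def last_nums_odd_or_even (list_of_int : List Int) (count : Int) (odd_or_even : String) : List Int :=
  -- Python returns the string 'Invalid count' (not a list of ints) on this branch; Pre_ excludes it
  if count > (list_of_int.length : Int) then []
  else
    let list_of_odd_or_even_nums : List Int :=
      if odd_or_even = "odd" then
        list_of_int.foldl (fun acc el => if ¬ (PySem.Int.mod el 2 == 0) then acc ++ [el] else acc) []
      else if odd_or_even = "even" then
        list_of_int.foldl (fun acc el => if PySem.Int.mod el 2 == 0 then acc ++ [el] else acc) []
      else []
    if count > (list_of_odd_or_even_nums.length : Int) then list_of_odd_or_even_nums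
    else PySem.List.slice list_of_odd_or_even_nums (some ((list_of_odd_or_even_nums.length : Int) - count)) none

-- ===== PORT B =====
-- backward scan collecting parity matches until `count` of them are picked
def pvAltLoop (pred : Int → Bool) (count : Int) : List Int → List Int → List Int
  | [], picked => picked
  | el :: rest, picked =>
    if (picked.length : Int) ≥ count then picked
    else if pred el then pvAltLoop pred count rest (picked ++ [el])
    else pvAltLoop pred count rest picked

def last_nums_odd_or_even_alt (list_of_int : List Int) (count : Int) (odd_or_even : String) : List Int :=
  -- Python returns the string 'Invalid count' (not a list of ints) on this branch; Pre_ excludes it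
  if count > (list_of_int.length : Int) then []
  else if odd_or_even = "odd" then
    (pvAltLoop (fun el => !(PySem.Int.mod el 2 == 0)) count list_of_int.reverse []).reverse
  else if odd_or_even = "even" then
    (pvAltLoop (fun el => PySem.Int.mod el 2 == 0) count list_of_int.reverse []).reverse
  else []

-- ===== PRECONDITION & SPEC =====
-- Pre_ excludes count > len(list_of_int), where Python A returns the string 'Invalid count', not a list of ints.
def Pre_last_nums_odd_or_even (list_of_int : List Int) (count : Int) (odd_or_even : String) : Prop :=
  count ≤ (list_of_int.length : Int)
instance (list_of_int : List Int) (count : Int) (odd_or_even : String) : Decidable (Pre_last_nums_odd_or_even list_of_int count odd_or_even) := by unfold Pre_last_nums_odd_or_even; infer_instance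
def pvWitness_last_nums_odd_or_even : List Int × Int × String := ([3, 4, 5, 6], 2, "odd")
def Spec_last_nums_odd_or_even (list_of_int : List Int) (count : Int) (odd_or_even : String) (out : List Int) : Prop := out = last_nums_odd_or_even_alt list_of_int count odd_or_even
instance (list_of_int : List Int) (count : Int) (odd_or_even : String) (out : List Int) : Decidable (Spec_last_nums_odd_or_even list_of_int count odd_or_even out) := by unfold Spec_last_nums_odd_or_even; infer_instance

-- ===== CLAIM (what is proved, stated in full; the proofs are below) =====
def Claim_equal_last_nums_odd_or_even : Prop := ∀ (list_of_int : List Int) (count : Int) (odd_or_even : String), Dom_last_nums_odd_or_even list_of_int count odd_or_even → Pre_last_nums_odd_or_even list_of_int count odd_or_even → Spec_last_nums_odd_or_even list_of_int count odd_or_even (last_nums_odd_or_even list_of_int count odd_or_even)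

-- ===== LEMMAS AND PROOFS =====

-- The backward scan collects exactly the first `count` remaining matches.
theorem pvAltLoop_spec (pred : Int → Bool) (count : Int) (xs picked : List Int) :
    pvAltLoop pred count xs picked =
      if (picked.length : Int) ≥ count then picked
      else picked ++ (xs.filter pred).take (count.toNat - picked.length) := by
  induction xs generalizing picked with
  | nil => simp [pvAltLoop]
  | cons el rest ih =>
    by_cases h : (picked.length : Int) ≥ count
    · simp [pvAltLoop, h]
    · have hlt : (picked.length : Int) < count := by omega
      have hpos : picked.length < count.toNat := by omega
      by_cases hp : pred el
      · rw [pvAltLoop]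
        simp only [if_neg h, if_pos hp, ih]
        have htake : (count.toNat - picked.length) = (count.toNat - (picked ++ [el]).length) + 1 := by
          simp; omega
        by_cases h2 : ((picked ++ [el]).length : Int) ≥ count
        · have : count.toNat - (picked ++ [el]).length = 0 := by simp; simp at h2; omega
          simp [hp, htake]
          intro _
          exact Or.inl (by omega)
        · simp [hp, htake]
          intro hh
          exfalso
          simp at h2
          omega
      · rw [pvAltLoop]
        simp [if_neg h, hp, ih]

theorem pvAltLoop_from_nil (pred : Int → Bool) (count : Int) (xs : List Int) :
    pvAltLoop pred count xs [] = (xs.filter pred).take count.toNat := by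
  rw [pvAltLoop_spec]
  by_cases h : (0 : Int) ≥ count
  · have : count.toNat = 0 := by omega
    simp [h, this]
  · simp at h ⊢
    omega

-- reversing the prefix of the reversed filtered list is the suffix of the filtered list
theorem pv_rev_take (f : List Int) (n : Nat) :
    (f.reverse.take n).reverse = f.drop (f.length - n) := by
  rcases Nat.le_total n f.length with h | h
  · apply List.reverse_eq_iff.mpr
    rw [List.reverse_drop]
    congr 1
    omega
  · rw [List.take_of_length_le (by simpa using h), List.reverse_reverse,
        Nat.sub_eq_zero_of_le h, List.drop_zero]

-- A's tail-slice of the filtered list, written as a single drop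
theorem pv_core (f : List Int) (count : Int) :
    (if count > (f.length : Int) then f
     else PySem.List.slice f (some ((f.length : Int) - count)) none)
    = f.drop (f.length - count.toNat) := by
  by_cases h : count > (f.length : Int)
  · rw [if_pos h]
    have h0 : f.length - count.toNat = 0 := by omega
    rw [h0, List.drop_zero]
  · rw [if_neg h, PySem.List.slice_from _ (by omega)]
    by_cases hc : 0 ≤ count
    · congr 1
      omega
    · have h1 : f.length ≤ ((f.length : Int) - count).toNat := by omega
      rw [List.drop_eq_nil_of_le h1]
      have h2 : count.toNat = 0 := by omega
      rw [h2, Nat.sub_zero, List.drop_length]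

-- one parity branch of the claim
theorem pv_branch (l : List Int) (count : Int) (pred : Int → Bool) :
    (if count > ((l.foldl (fun acc el => if pred el then acc ++ [el] else acc) []).length : Int)
     then l.foldl (fun acc el => if pred el then acc ++ [el] else acc) []
     else PySem.List.slice (l.foldl (fun acc el => if pred el then acc ++ [el] else acc) [])
        (some (((l.foldl (fun acc el => if pred el then acc ++ [el] else acc) []).length : Int) - count)) none)
    = (pvAltLoop pred count l.reverse []).reverse := by
  rw [PySem.List.foldl_append_if_eq_filter, List.nil_append, pv_core,
      pvAltLoop_from_nil, List.filter_reverse, pv_rev_take]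

theorem last_nums_odd_or_even_spec : Claim_equal_last_nums_odd_or_even := by
  intro l count s _ hpre
  unfold Spec_last_nums_odd_or_even
  unfold Pre_last_nums_odd_or_even at hpre
  unfold last_nums_odd_or_even last_nums_odd_or_even_alt
  have hc : ¬ count > (l.length : Int) := not_lt.mpr hpre
  rw [if_neg hc, if_neg hc]
  by_cases ho : s = "odd"
  · have hne : ¬ s = "even" := by rw [ho]; decide
    simp only [if_pos ho, if_neg hne]
    have hfun : (fun (acc : List Int) (el : Int) => if ¬ (PySem.Int.mod el 2 == 0) then acc ++ [el] else acc)
        = (fun acc el => if (!(PySem.Int.mod el 2 == 0)) then acc ++ [el] else acc) := by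
      funext acc el
      cases hb : (PySem.Int.mod el 2 == 0)
      · simp
      · simp
    rw [hfun]
    exact pv_branch l count (fun el => !(PySem.Int.mod el 2 == 0))
  · by_cases he : s = "even"
    · simp only [if_neg ho, if_pos he]
      exact pv_branch l count (fun el => PySem.Int.mod el 2 == 0)
    · simp only [if_neg ho, if_neg he]
      rw [pv_core]
      simp
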